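-- pv_equiv track=rewrite | github.com/JobQiu/LeetCodeCompetition | Congmin Qiu/toDo/company/amazon/minmaxpath.py | helper3
-- ===== SOURCE A (Python) =====
-- def helper3(matrix):
--     num_row = len(matrix)
--     num_col = len(matrix[0])
--
--
--     dp = [0] * num_col
--     dp[0] = matrix[0][0]
--
--     for i in range(1, num_col):
--         dp[i] = min(dp[i-1],matrix[0][i])
--
--     for i in range(1, num_row):
--         dp[0] = min(dp[0], matrix[i][0])#
--
--         for j in range(1, num_col):
--             prevMax = max(dp[j-1], dp[j])
--             dp[j] = min(prevMax, matrix[i][j])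
--     return dp[-1]
--     pass
-- ===== SOURCE B (Python) =====
-- from functools import lru_cache
--
--
-- def helper3(matrix):
--     num_row = len(matrix)
--     num_col = len(matrix[0])
--
--     @lru_cache(maxsize=None)
--     def rec(i, j):
--         if i == 0 and j == 0:
--             return matrix[0][0]
--         if i == 0:
--             return min(rec(0, j - 1), matrix[0][j])
--         if j == 0:
--             return min(rec(i - 1, 0), matrix[i][0])
--         return min(max(rec(i, j - 1), rec(i - 1, j)), matrix[i][j])
--
--     return rec(num_row - 1, num_col - 1)
-- ===== Notes on version B (the rewrite author's own statement) =====
-- stated objective: alternative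
-- what changed: Replaced A's iterative single-row DP (a dp array mutated in place across two nested loops) by a top-down lru_cache-memoized recursion rec(i,j) mirroring the recurrence directly.
import Mathlib
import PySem

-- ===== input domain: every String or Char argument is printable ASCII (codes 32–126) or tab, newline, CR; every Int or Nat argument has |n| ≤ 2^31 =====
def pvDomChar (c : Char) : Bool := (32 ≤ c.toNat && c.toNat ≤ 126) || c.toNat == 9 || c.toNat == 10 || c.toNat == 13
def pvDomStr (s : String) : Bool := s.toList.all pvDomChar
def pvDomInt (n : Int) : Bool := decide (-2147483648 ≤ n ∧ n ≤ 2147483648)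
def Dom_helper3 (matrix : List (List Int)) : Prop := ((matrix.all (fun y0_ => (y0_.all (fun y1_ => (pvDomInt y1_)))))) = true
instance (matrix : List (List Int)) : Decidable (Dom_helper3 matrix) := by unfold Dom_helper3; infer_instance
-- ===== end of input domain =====

-- B replaces A's in-place one-row DP loops by a top-down memoized recursion on the cell
-- indices (objective: alternative decomposition, same asymptotic cost).

-- matrix[i][j] for Nat indices; exact for in-range indices, which Pre_helper3 guarantees
-- at every access both ports make.
def mget (matrix : List (List Int)) (i j : Nat) : Int := (matrix.getD i []).getD j 0

-- ===== PORT A =====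
-- A: dp over one row, first row filled by a running min, then each further row folded
-- in place; 'for i in range(1, n)' is the fold over List.range' 1 (n-1).
def helper3 (matrix : List (List Int)) : Int :=
  let num_row := matrix.length
  let num_col := (matrix.getD 0 []).length    -- len(matrix[0]); Pre_ excludes matrix = []
  let dp : List Int := List.replicate num_col 0
  let dp := dp.set 0 (mget matrix 0 0)
  let dp := (List.range' 1 (num_col - 1)).foldl
    (fun dp i => dp.set i (min (dp.getD (i-1) 0) (mget matrix 0 i))) dp
  let dp := (List.range' 1 (num_row - 1)).foldl
    (fun dp i =>
      let dp := dp.set 0 (min (dp.getD 0 0) (mget matrix i 0))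
      (List.range' 1 (num_col - 1)).foldl
        (fun dp j => dp.set j (min (max (dp.getD (j-1) 0) (dp.getD j 0)) (mget matrix i j))) dp)
    dp
  (PySem.List.pyGet? dp (-1)).getD 0          -- dp[-1]; dp nonempty under Pre_

-- ===== PORT B =====
-- B's rec(i, j) with @lru_cache; the cache is a stdlib memoization of this same pure
-- recursion, so the port is the recursion itself.
def rec3 (matrix : List (List Int)) : Nat → Nat → Int
  | 0, 0 => mget matrix 0 0
  | 0, j+1 => min (rec3 matrix 0 j) (mget matrix 0 (j+1))
  | i+1, 0 => min (rec3 matrix i 0) (mget matrix (i+1) 0)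
  | i+1, j+1 => min (max (rec3 matrix (i+1) j) (rec3 matrix i (j+1))) (mget matrix (i+1) (j+1))
  termination_by i j => (i, j)

def helper3_alt (matrix : List (List Int)) : Int :=
  let num_row := matrix.length
  let num_col := (matrix.getD 0 []).length
  rec3 matrix (num_row - 1) (num_col - 1)

-- ===== PRECONDITION & SPEC =====
-- A raises IndexError exactly when the matrix is empty, its first row is empty, or some
-- row is shorter than the first row; Pre_ excludes exactly those inputs.
def Pre_helper3 (matrix : List (List Int)) : Prop :=
  matrix ≠ [] ∧ (matrix.getD 0 []) ≠ [] ∧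
    (matrix.all (fun r => (matrix.getD 0 []).length ≤ r.length)) = true
instance (matrix : List (List Int)) : Decidable (Pre_helper3 matrix) := by
  unfold Pre_helper3; infer_instance

def pvWitness_helper3 : List (List Int) := [[5, 1], [4, 5]]

def Spec_helper3 (matrix : List (List Int)) (out : Int) : Prop := out = helper3_alt matrix
instance (matrix : List (List Int)) (out : Int) : Decidable (Spec_helper3 matrix out) := by
  unfold Spec_helper3; infer_instance

-- ===== CLAIM (what is proved, stated in full; the proofs are below) =====
def Claim_equal_helper3 : Prop :=
  ∀ (matrix : List (List Int)), Dom_helper3 matrix → Pre_helper3 matrix →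
    Spec_helper3 matrix (helper3 matrix)

-- ===== LEMMAS AND PROOFS =====

theorem getD_set_self (l : List Int) (i : Nat) (a : Int) (h : i < l.length) :
    (l.set i a).getD i 0 = a := by simp [List.getD, h]

theorem getD_set_ne (l : List Int) (i j : Nat) (a : Int) (h : i ≠ j) :
    (l.set i a).getD j 0 = l.getD j 0 := by simp [List.getD, h]

theorem rec3_zero_zero (m : List (List Int)) : rec3 m 0 0 = mget m 0 0 := by rw [rec3]

theorem rec3_zero_succ (m : List (List Int)) (j : Nat) :
    rec3 m 0 (j+1) = min (rec3 m 0 j) (mget m 0 (j+1)) := by rw [rec3]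

theorem rec3_succ_zero (m : List (List Int)) (i : Nat) :
    rec3 m (i+1) 0 = min (rec3 m i 0) (mget m (i+1) 0) := by rw [rec3]

theorem rec3_succ_succ (m : List (List Int)) (i j : Nat) :
    rec3 m (i+1) (j+1) =
      min (max (rec3 m (i+1) j) (rec3 m i (j+1))) (mget m (i+1) (j+1)) := by rw [rec3]

-- Phase 1: A's first-row loop over columns 1..k leaves rec3 m 0 j at every j ≤ k.
theorem phase1 (m : List (List Int)) (nc k : Nat) (hk : k < nc) :
    let dp := (List.range' 1 k).foldl
      (fun dp i => dp.set i (min (dp.getD (i-1) 0) (mget m 0 i)))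
      ((List.replicate nc (0:Int)).set 0 (mget m 0 0))
    dp.length = nc ∧ ∀ j < nc, dp.getD j 0 = if j ≤ k then rec3 m 0 j else 0 := by
  induction k with
  | zero =>
      simp only [List.range'_zero, List.foldl_nil]
      refine ⟨by simp, ?_⟩
      intro j hj
      rcases j with _ | j
      · rw [if_pos (Nat.le_refl 0), rec3_zero_zero]
        exact getD_set_self _ _ _ (by simp; omega)
      · rw [if_neg (by omega), getD_set_ne _ _ _ _ (by omega)]
        simp
  | succ k ih =>
      obtain ⟨hlen, hv⟩ := ih (by omega)
      rw [List.range'_concat, List.foldl_append]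
      simp only [List.foldl_cons, List.foldl_nil, one_mul]
      refine ⟨by simpa using hlen, ?_⟩
      intro j hj
      by_cases hcase : 1 + k = j
      · subst hcase
        rw [getD_set_self _ _ _ (by omega), if_pos (by omega)]
        rw [show (1 + k - 1 : Nat) = k from by omega]
        have hvk := hv k (by omega); rw [if_pos (Nat.le_refl k)] at hvk
        rw [hvk, show (1 + k : Nat) = k + 1 from by omega, rec3_zero_succ]
      · rw [getD_set_ne _ _ _ _ hcase, hv j hj]
        by_cases hjk : j ≤ k
        · rw [if_pos hjk, if_pos (by omega)]
        · rw [if_neg hjk, if_neg (by omega)]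

-- Phase 2: one inner loop of row i+1, starting from a row holding rec3 m (i+1) 0 at
-- column 0 and rec3 m i j elsewhere; after columns 1..k it holds rec3 m (i+1) j at j ≤ k.
theorem phase2 (m : List (List Int)) (nc i k : Nat) (hk : k < nc)
    (dp : List Int) (hlen : dp.length = nc)
    (h0 : dp.getD 0 0 = rec3 m (i+1) 0)
    (hrest : ∀ j, 1 ≤ j → j < nc → dp.getD j 0 = rec3 m i j) :
    let dp' := (List.range' 1 k).foldl
      (fun dp j => dp.set j (min (max (dp.getD (j-1) 0) (dp.getD j 0)) (mget m (i+1) j))) dp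
    dp'.length = nc ∧
      ∀ j < nc, dp'.getD j 0 = if j ≤ k then rec3 m (i+1) j else rec3 m i j := by
  induction k with
  | zero =>
      simp only [List.range'_zero, List.foldl_nil]
      refine ⟨hlen, ?_⟩
      intro j hj
      rcases j with _ | j
      · rw [if_pos (Nat.le_refl 0)]; exact h0
      · rw [if_neg (by omega)]; exact hrest (j+1) (by omega) hj
  | succ k ih =>
      obtain ⟨hlen', hv⟩ := ih (by omega)
      rw [List.range'_concat, List.foldl_append]
      simp only [List.foldl_cons, List.foldl_nil, one_mul]
      refine ⟨by simpa using hlen', ?_⟩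
      intro j hj
      by_cases hcase : 1 + k = j
      · subst hcase
        rw [getD_set_self _ _ _ (by omega), if_pos (by omega)]
        rw [show (1 + k - 1 : Nat) = k from by omega]
        have hL := hv k (by omega); rw [if_pos (Nat.le_refl k)] at hL
        have hU := hv (1+k) (by omega); rw [if_neg (by omega)] at hU
        rw [hL, hU, show (1 + k : Nat) = k + 1 from by omega, rec3_succ_succ]
      · rw [getD_set_ne _ _ _ _ hcase, hv j hj]
        by_cases hjk : j ≤ k
        · rw [if_pos hjk, if_pos (by omega)]
        · rw [if_neg hjk, if_neg (by omega)]

-- Phase 3: after A's outer loop over rows 1..i, the dp row holds rec3 m i j everywhere.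
theorem phase3 (m : List (List Int)) (nc : Nat) (hnc : 1 ≤ nc) (i : Nat) :
    let dp0 := (List.range' 1 (nc - 1)).foldl
      (fun dp i => dp.set i (min (dp.getD (i-1) 0) (mget m 0 i)))
      ((List.replicate nc (0:Int)).set 0 (mget m 0 0))
    let dp := (List.range' 1 i).foldl
      (fun dp i =>
        let dp := dp.set 0 (min (dp.getD 0 0) (mget m i 0))
        (List.range' 1 (nc - 1)).foldl
          (fun dp j => dp.set j (min (max (dp.getD (j-1) 0) (dp.getD j 0)) (mget m i j))) dp)
      dp0
    dp.length = nc ∧ ∀ j < nc, dp.getD j 0 = rec3 m i j := by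
  induction i with
  | zero =>
      obtain ⟨hlen, hv⟩ := phase1 m nc (nc - 1) (by omega)
      simp only [List.range'_zero, List.foldl_nil]
      exact ⟨hlen, fun j hj => by have := hv j hj; rwa [if_pos (by omega)] at this⟩
  | succ i ih =>
      obtain ⟨hlen, hv⟩ := ih
      rw [List.range'_concat]
      simp only [List.foldl_append, List.foldl_cons, List.foldl_nil, one_mul]
      set dpA := (List.range' 1 i).foldl _ _ with hdpA
      set dpB := dpA.set 0 (min (dpA.getD 0 0) (mget m (1+i) 0)) with hdpB
      have hlenB : dpB.length = nc := by rw [hdpB]; simpa using hlen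
      have h0new : dpB.getD 0 0 = rec3 m (i+1) 0 := by
        rw [hdpB, getD_set_self _ _ _ (by omega), hv 0 (by omega),
          show (1 + i : Nat) = i + 1 from by omega, rec3_succ_zero]
      have hrest : ∀ j, 1 ≤ j → j < nc → dpB.getD j 0 = rec3 m i j := by
        intro j h1j hj
        rw [hdpB, getD_set_ne _ _ _ _ (by omega), hv j hj]
      obtain ⟨hlen', hv'⟩ := phase2 m nc i (nc - 1) (by omega) dpB hlenB h0new hrest
      rw [show (1 + i : Nat) = i + 1 from by omega]
      refine ⟨hlen', ?_⟩
      intro j hj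
      have := hv' j hj
      rwa [if_pos (by omega)] at this

-- ===== VERDICT (by name: the statement is the Claim_ definition above) =====
theorem helper3_spec : Claim_equal_helper3 := by
  intro matrix _hdom hpre
  obtain ⟨hne, hrow, _hall⟩ := hpre
  unfold Spec_helper3 helper3 helper3_alt
  simp only []
  set nc := (matrix.getD 0 []).length with hnc
  have hnc1 : 1 ≤ nc := by
    rcases h : matrix.getD 0 [] with _ | ⟨a, r⟩
    · exact absurd h hrow
    · rw [hnc, h]; simp
  obtain ⟨hlen, hv⟩ := phase3 matrix nc hnc1 (matrix.length - 1)
  set dp := (List.range' 1 (matrix.length - 1)).foldl _ _ with hdp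
  rw [PySem.List.pyGet?_neg_one, List.getLast?_eq_getElem?, hlen]
  have hfin := hv (nc - 1) (by omega)
  simp only [List.getD] at hfin
  rw [show dp[nc-1]?.getD 0 = rec3 matrix (matrix.length - 1) (nc - 1) from hfin]

-- witness sanity: Dom and Pre hold at the witness
theorem pvWitness_ok : Dom_helper3 pvWitness_helper3 ∧ Pre_helper3 pvWitness_helper3 := by
  decide
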